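-- pv_equiv track=rewrite | github.com/iTom34/advent_2023 | advent/day_2.py | minimum_cubes
-- ===== SOURCE A (Python) =====
-- def minimum_cubes(sets: list) -> dict:
--     """
--     Find the minimum number of cubes necessary to a game to be possible
--     :param sets: All the sets of a game
--     :return: Dictionary with the minimum of cubes
--     """
--     minimums = {}
--     for a_set in sets:
--         for colour, quantity in a_set:
--             if colour not in minimums:
--                 minimums[colour] = quantity
--
--             else:
--                 if minimums[colour] < quantity:
--                     minimums[colour] = quantity
--
--     return minimums
-- ===== SOURCE B (Python) =====
-- def minimum_cubes(sets: list) -> dict: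
--     """
--     Find the minimum number of cubes necessary to a game to be possible
--     :param sets: All the sets of a game
--     :return: Dictionary with the minimum of cubes
--     """
--     pairs = [pair for a_set in sets for pair in a_set]
--     groups = {}
--     for colour, quantity in pairs:
--         groups.setdefault(colour, []).append(quantity)
--     return {colour: max(quantities) for colour, quantities in groups.items()}
-- ===== Notes on version B (the rewrite author's own statement) =====
-- stated objective: alternative
-- what changed: B separates collection from aggregation: it flattens all (colour, quantity) pairs, groups the quantities per colour into lists, and then builds the result as a dict comprehension taking max of each group, instead of maintaining a running per-colour maximum inline.
import Mathlib
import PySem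

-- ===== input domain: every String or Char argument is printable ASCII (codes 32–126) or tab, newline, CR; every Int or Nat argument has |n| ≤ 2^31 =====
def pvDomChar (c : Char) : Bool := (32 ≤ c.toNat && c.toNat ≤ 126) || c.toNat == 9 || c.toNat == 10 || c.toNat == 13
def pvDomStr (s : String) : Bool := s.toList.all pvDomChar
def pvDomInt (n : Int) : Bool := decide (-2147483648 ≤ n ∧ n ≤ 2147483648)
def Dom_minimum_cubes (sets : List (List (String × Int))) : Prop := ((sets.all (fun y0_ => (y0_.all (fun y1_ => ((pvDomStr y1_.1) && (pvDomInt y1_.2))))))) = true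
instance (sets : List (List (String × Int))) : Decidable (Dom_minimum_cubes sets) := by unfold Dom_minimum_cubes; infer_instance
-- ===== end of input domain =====

-- B separates collection (group all (colour, quantity) pairs per colour) from aggregation
-- (max per group), instead of A's inline running maximum; alternative decomposition, same cost.


-- ===== PORT A =====
-- one (colour, quantity) step of A's inner loop; minimums[colour] is read as getD 0:
-- exact, since it is only read under 'colour in minimums'
def pvStepA (minimums : PySem.Dict String Int) (p : String × Int) : PySem.Dict String Int :=
  if minimums.contains p.1 = false then minimums.insert p.1 p.2
  else if minimums.getD p.1 0 < p.2 then minimums.insert p.1 p.2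
  else minimums

def minimum_cubes (sets : List (List (String × Int))) : List (String × Int) :=
  (sets.foldl (fun minimums a_set => a_set.foldl pvStepA minimums) PySem.Dict.empty).items

-- ===== PORT B =====
-- max(quantities); the groups' lists are never empty, so the getD default is never read
def pvMax (qs : List Int) : Int := (PySem.List.max? qs (fun y => y)).getD 0

-- groups.setdefault(colour, []).append(quantity)  ==  groups[colour] = groups.get(colour, []) + [quantity]
def pvGroupStep (groups : PySem.Dict String (List Int)) (p : String × Int) :
    PySem.Dict String (List Int) :=
  groups.modify p.1 [] (fun qs => qs ++ [p.2])

def minimum_cubes_alt (sets : List (List (String × Int))) : List (String × Int) :=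
  let pairs := sets.flatMap (fun a_set => a_set)
  let groups := pairs.foldl pvGroupStep PySem.Dict.empty
  -- the dict comprehension: a fresh dict built by inserting (colour, max(quantities)) in order
  (groups.items.foldl (fun d ci => d.insert ci.1 (pvMax ci.2)) PySem.Dict.empty).items

-- ===== PRECONDITION & SPEC =====
def Spec_minimum_cubes (sets : List (List (String × Int))) (out : List (String × Int)) : Prop := out = minimum_cubes_alt sets
instance (sets : List (List (String × Int))) (out : List (String × Int)) : Decidable (Spec_minimum_cubes sets out) := by unfold Spec_minimum_cubes; infer_instance

-- ===== CLAIM (what is proved, stated in full; the proofs are below) =====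
def Claim_equal_minimum_cubes : Prop := ∀ (sets : List (List (String × Int))), Dom_minimum_cubes sets → Spec_minimum_cubes sets (minimum_cubes sets)

-- ===== LEMMAS AND PROOFS =====

-- max over a nonempty list extended by one element
theorem pvMax_append (x : Int) (t : List Int) (q : Int) :
    pvMax ((x :: t) ++ [q]) = max (pvMax (x :: t)) q := by
  simp [pvMax, PySem.List.max?_id_cons, List.foldl_append]

theorem pvMax_singleton (q : Int) : pvMax [q] = q := by
  simp [pvMax, PySem.List.max?_id_cons]

-- re-inserting a key's current value changes nothing (unique keys)
theorem pv_insert_getD_self {ν : Type} (d : PySem.Dict String ν) (k : String) (dflt : ν)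
    (hnd : d.keys.Nodup) (hc : d.contains k = true) :
    d.insert k (d.getD k dflt) = d := by
  apply PySem.Dict.ext
  rw [PySem.Dict.items_insert_of_contains d _ hc]
  conv_rhs => rw [← List.map_id d.items]
  apply List.map_congr_left
  intro p hp
  by_cases h : p.1 = k
  · rw [if_pos (beq_iff_eq.mpr h)]
    have hm : (k, p.2) ∈ d.items := by rw [← h]; exact hp
    rw [PySem.Dict.getD_of_mem_items d hm hnd dflt, ← h]
    exact Prod.mk.eta
  · simp [h]

-- on a present key, A's step is "insert the max of old and new"
theorem pvStepA_contains (d : PySem.Dict String Int) (p : String × Int)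
    (hnd : d.keys.Nodup) (hc : d.contains p.1 = true) :
    pvStepA d p = d.insert p.1 (max (d.getD p.1 0) p.2) := by
  unfold pvStepA
  rw [hc]
  simp only [Bool.true_eq_false, if_false]
  by_cases h : d.getD p.1 0 < p.2
  · rw [if_pos h, max_eq_right (le_of_lt h)]
  · rw [if_neg h, max_eq_left (le_of_not_gt h), pv_insert_getD_self d p.1 0 hnd hc]

-- the main invariant: A's dict is, item for item, B's group dict with pvMax applied
theorem pv_inv (l : List (String × Int)) (dA : PySem.Dict String Int)
    (dG : PySem.Dict String (List Int))
    (hnd : dG.keys.Nodup) (hne : ∀ q ∈ dG.items, q.2 ≠ [])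
    (hit : dA.items = dG.items.map (fun ci => (ci.1, pvMax ci.2))) :
    (l.foldl pvStepA dA).items
      = (l.foldl pvGroupStep dG).items.map (fun ci => (ci.1, pvMax ci.2))
    ∧ (l.foldl pvGroupStep dG).keys.Nodup
    ∧ ∀ q ∈ (l.foldl pvGroupStep dG).items, q.2 ≠ [] := by
  induction l generalizing dA dG with
  | nil => exact ⟨hit, hnd, hne⟩
  | cons p l ih =>
    simp only [List.foldl_cons]
    have hkeys : dA.keys = dG.keys := by
      show dA.items.map (·.1) = dG.items.map (·.1)
      rw [hit, List.map_map]; rfl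
    have hndA : dA.keys.Nodup := hkeys ▸ hnd
    have hcc : dA.contains p.1 = dG.contains p.1 := by
      rw [PySem.Dict.contains_eq_decide_mem_keys, PySem.Dict.contains_eq_decide_mem_keys, hkeys]
    have hGstep : pvGroupStep dG p = dG.insert p.1 (dG.getD p.1 [] ++ [p.2]) := rfl
    have hndG' : (pvGroupStep dG p).keys.Nodup := by
      rw [hGstep]; exact PySem.Dict.nodup_keys_insert dG _ _ hnd
    by_cases hc : dG.contains p.1 = true
    · -- colour already present: A keeps the max, B appends to the group
      have hcA : dA.contains p.1 = true := by rw [hcc]; exact hc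
      have hne' : ∀ q ∈ (pvGroupStep dG p).items, q.2 ≠ [] := by
        intro q hq
        rw [hGstep, PySem.Dict.items_insert_of_contains dG _ hc] at hq
        obtain ⟨r, hr, hrq⟩ := List.mem_map.mp hq
        by_cases h : r.1 = p.1
        · simp only [h, beq_self_eq_true, if_pos] at hrq
          rw [← hrq]; simp
        · rw [if_neg (by simp [h])] at hrq
          rw [← hrq]; exact hne r hr
      have hit' : (pvStepA dA p).items
          = (pvGroupStep dG p).items.map (fun ci => (ci.1, pvMax ci.2)) := by
        rw [pvStepA_contains dA p hndA hcA,
          PySem.Dict.items_insert_of_contains dA _ hcA,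
          hGstep, PySem.Dict.items_insert_of_contains dG _ hc, hit,
          List.map_map, List.map_map]
        apply List.map_congr_left
        intro q hq
        by_cases h : q.1 = p.1
        · have hmem : (p.1, q.2) ∈ dG.items := by rw [← h]; exact hq
          have hget : dG.getD p.1 [] = q.2 := PySem.Dict.getD_of_mem_items dG hmem hnd []
          have hmemA : (p.1, pvMax q.2) ∈ dA.items := by
            rw [hit]; exact List.mem_map.mpr ⟨q, hq, by rw [h]⟩
          have hgetA : dA.getD p.1 0 = pvMax q.2 :=
            PySem.Dict.getD_of_mem_items dA hmemA hndA 0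
          obtain ⟨x, t, ht⟩ : ∃ x t, q.2 = x :: t := by
            cases hq2 : q.2 with
            | nil => exact absurd hq2 (hne q hq)
            | cons x t => exact ⟨x, t, rfl⟩
          simp only [Function.comp, h, beq_self_eq_true, if_pos, hget, hgetA]
          rw [ht, pvMax_append]
        · simp only [Function.comp, beq_iff_eq, h, if_false]
      exact ih _ _ hndG' hne' hit'
    · -- a new colour: both sides append one item
      have hc' : dG.contains p.1 = false := by simp only [Bool.not_eq_true] at hc; exact hc
      have hcA : dA.contains p.1 = false := by rw [hcc]; exact hc'
      have hget : dG.getD p.1 [] = [] := PySem.Dict.getD_of_not_contains dG [] hc'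
      have hGstep' : pvGroupStep dG p = dG.insert p.1 [p.2] := by rw [hGstep, hget]; rfl
      have hne' : ∀ q ∈ (pvGroupStep dG p).items, q.2 ≠ [] := by
        intro q hq
        rw [hGstep', PySem.Dict.items_insert_of_not_contains dG _ hc'] at hq
        rcases List.mem_append.mp hq with h | h
        · exact hne q h
        · simp only [List.mem_singleton] at h; rw [h]; simp
      have hstepA : pvStepA dA p = dA.insert p.1 p.2 := by
        unfold pvStepA; rw [hcA]; simp
      have hit' : (pvStepA dA p).items
          = (pvGroupStep dG p).items.map (fun ci => (ci.1, pvMax ci.2)) := by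
        rw [hstepA, PySem.Dict.items_insert_of_not_contains dA _ hcA,
          hGstep', PySem.Dict.items_insert_of_not_contains dG _ hc',
          List.map_append, hit]
        simp [pvMax_singleton]
      exact ih _ _ hndG' hne' hit'

-- A's nested loops are B's single loop over the flattened pair list
theorem pv_foldl_flat (sets : List (List (String × Int))) (d : PySem.Dict String Int) :
    sets.foldl (fun minimums a_set => a_set.foldl pvStepA minimums) d
      = (sets.flatMap (fun a_set => a_set)).foldl pvStepA d := by
  induction sets generalizing d with
  | nil => rfl
  | cons s sets ih => simp only [List.foldl_cons, List.flatMap_cons, List.foldl_append, ih]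

-- ===== VERDICT (by name: the statement is the Claim_ definition above) =====
theorem minimum_cubes_spec : Claim_equal_minimum_cubes := by
  intro sets _
  unfold Spec_minimum_cubes minimum_cubes minimum_cubes_alt
  rw [pv_foldl_flat]
  have h0 : (PySem.Dict.empty : PySem.Dict String Int).items
      = (PySem.Dict.empty : PySem.Dict String (List Int)).items.map
          (fun ci => (ci.1, pvMax ci.2)) := rfl
  have hnd0 : (PySem.Dict.empty : PySem.Dict String (List Int)).keys.Nodup :=
    PySem.Dict.nodup_keys_empty
  have hne0 : ∀ q ∈ (PySem.Dict.empty : PySem.Dict String (List Int)).items, q.2 ≠ [] := by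
    intro q hq; exact absurd hq (by simp [PySem.Dict.empty])
  obtain ⟨hit, hnd, _⟩ :=
    pv_inv (sets.flatMap (fun a_set => a_set)) PySem.Dict.empty PySem.Dict.empty hnd0 hne0 h0
  set groups := (sets.flatMap (fun a_set => a_set)).foldl pvGroupStep PySem.Dict.empty with hg
  rw [PySem.Dict.items_foldl_insert_fresh groups.items (·.1) (fun ci => pvMax ci.2)
      PySem.Dict.empty (fun a _ => PySem.Dict.contains_empty a.1) hnd]
  simpa using hit
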